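-- pv_equiv track=rewrite | github.com/Yatrogenesis/PP25-Chaotic_Attractor_Compression | code/generate_bert_embeddings.py | generate_news_articles
-- ===== SOURCE A (Python) =====
-- def generate_news_articles(n_samples=2000):
--     """Generate news-like sentences with temporal drift"""
--     categories = ["politics", "sports", "technology", "science", "business"]
--
--     sentences = []
--     for i in range(n_samples):
--         cat = categories[i % len(categories)]
--         sentences.append(
--             f"Breaking news in {cat}: New developments reported in {cat} sector today."
--         )
--
--     return sentences
-- ===== SOURCE B (Python) =====
-- def generate_news_articles(n_samples=2000):
--     """Generate news-like sentences with temporal drift"""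
--     categories = ["politics", "sports", "technology", "science", "business"]
--     cycle = [
--         f"Breaking news in {cat}: New developments reported in {cat} sector today."
--         for cat in categories
--     ]
--     q, r = divmod(max(n_samples, 0), len(cycle))
--     return cycle * q + cycle[:r]
-- ===== Notes on version B (the rewrite author's own statement) =====
-- stated objective: faster
-- what changed: Replaces the per-element loop (one format and one modulo per iteration) with whole-block construction: build the full cycle of distinct sentences once, then produce the result as list repetition cycle*q plus the slice cycle[:r] from divmod of the count by the cycle length, so there is no per-element work at all.
import Mathlib
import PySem

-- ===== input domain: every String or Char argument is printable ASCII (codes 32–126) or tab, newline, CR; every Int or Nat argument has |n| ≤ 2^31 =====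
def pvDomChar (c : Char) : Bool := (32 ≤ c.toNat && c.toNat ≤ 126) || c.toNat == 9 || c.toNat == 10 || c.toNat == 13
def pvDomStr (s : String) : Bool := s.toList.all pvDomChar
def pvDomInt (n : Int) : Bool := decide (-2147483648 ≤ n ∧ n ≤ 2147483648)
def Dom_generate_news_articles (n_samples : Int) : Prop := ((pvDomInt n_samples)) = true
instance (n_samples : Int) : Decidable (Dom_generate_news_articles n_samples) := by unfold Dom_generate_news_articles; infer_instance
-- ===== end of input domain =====

-- B builds the 5-sentence cycle once and constructs the result by block repetition plus a slice
-- (cycle * (n // 5) + cycle[:n % 5]) instead of formatting each element in a per-index loop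
-- (objective: faster, constant-factor — no per-element work).

-- the f-string of both Pythons
def pvSentence (cat : String) : String :=
  "Breaking news in " ++ cat ++ ": New developments reported in " ++ cat ++ " sector today."

def pvCategories : List String := ["politics", "sports", "technology", "science", "business"]

-- ===== PORT A =====
-- loop: for i in range(n_samples): sentences.append(f"…{categories[i % 5]}…")
-- categories[i % len(categories)] is always in range (i ≥ 0), so pyGetD with a dummy default is exact here
def generate_news_articles (n_samples : Int) : List String :=
  (PySem.List.pyRange 0 n_samples 1).foldl
    (fun sentences i =>
      sentences ++ [pvSentence (PySem.List.pyGetD pvCategories (PySem.Int.mod i 5) "")])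
    []

-- ===== PORT B =====
-- cycle = [f"…{cat}…" for cat in categories]; q, r = divmod(max(n, 0), 5); cycle * q + cycle[:r]
def generate_news_articles_alt (n_samples : Int) : List String :=
  let cycle := pvCategories.map pvSentence
  let q := PySem.Int.floordiv (max n_samples 0) 5
  let r := PySem.Int.mod (max n_samples 0) 5
  (List.replicate q.toNat cycle).flatten ++ cycle.take r.toNat

-- ===== PRECONDITION & SPEC =====
def Spec_generate_news_articles (n_samples : Int) (out : List String) : Prop := out = generate_news_articles_alt n_samples
instance (n_samples : Int) (out : List String) : Decidable (Spec_generate_news_articles n_samples out) := by unfold Spec_generate_news_articles; infer_instance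

-- ===== CLAIM (what is proved, stated in full; the proofs are below) =====
def Claim_equal_generate_news_articles : Prop := ∀ (n_samples : Int), Dom_generate_news_articles n_samples → Spec_generate_news_articles n_samples (generate_news_articles n_samples)

-- ===== LEMMAS AND PROOFS =====

theorem pv_foldl_append_map {α β : Type} (f : α → β) (xs : List α) (acc : List β) :
    xs.foldl (fun s i => s ++ [f i]) acc = acc ++ xs.map f := by
  induction xs generalizing acc with
  | nil => simp
  | cons x t ih => simp [List.foldl, ih]

-- the A-side element at natural index i is the cycle-table entry at i % 5
theorem pv_elem_eq (i : Nat) :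
    pvSentence (PySem.List.pyGetD pvCategories (PySem.Int.mod ((i : Int)) 5) "") =
      (pvCategories.map pvSentence).getD (i % 5) "" := by
  rw [PySem.Int.mod_eq_emod_of_pos (by norm_num)]
  have h : ((i : Int)) % 5 = ((i % 5 : Nat) : Int) := by omega
  rw [h]
  have h5 : i % 5 < 5 := Nat.mod_lt _ (by norm_num)
  interval_cases (i % 5) <;> rfl

-- take k ++ [l.getD k] = take (k+1) for an in-range k
theorem pv_take_getD (l : List String) (k : Nat) (h : k < l.length) :
    l.take k ++ [l.getD k ""] = l.take (k + 1) := by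
  rw [List.take_add_one]
  simp [List.getD, List.getElem?_eq_getElem h]

-- core combinatorial fact: mapping index→cycle[i % 5] over range m is q whole cycles plus a prefix
theorem pv_range_mod_eq (cycle : List String) (hlen : cycle.length = 5) (m : Nat) :
    (List.range m).map (fun i => cycle.getD (i % 5) "") =
      (List.replicate (m / 5) cycle).flatten ++ cycle.take (m % 5) := by
  induction m with
  | zero => simp
  | succ m ih =>
    rw [List.range_succ, List.map_append, ih]
    simp only [List.map_cons, List.map_nil]
    have hlt : m % 5 < cycle.length := by omega
    by_cases h4 : m % 5 = 4
    · have hq : (m + 1) / 5 = m / 5 + 1 := by omega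
      have hr : (m + 1) % 5 = 0 := by omega
      have hfull : cycle.take (m % 5) ++ [cycle.getD (m % 5) ""] = cycle := by
        rw [pv_take_getD cycle _ hlt, h4, List.take_of_length_le (by omega)]
      rw [hq, hr, List.replicate_succ', List.flatten_append, List.append_assoc, hfull]
      simp
    · have hq : (m + 1) / 5 = m / 5 := by omega
      have hr : (m + 1) % 5 = m % 5 + 1 := by omega
      rw [hq, hr, List.append_assoc, pv_take_getD cycle _ hlt]

theorem generate_news_articles_eq (n : Int) :
    generate_news_articles n = generate_news_articles_alt n := by
  unfold generate_news_articles generate_news_articles_alt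
  show _ = (List.replicate (PySem.Int.floordiv (max n 0) 5).toNat (pvCategories.map pvSentence)).flatten
        ++ (pvCategories.map pvSentence).take (PySem.Int.mod (max n 0) 5).toNat
  rw [pv_foldl_append_map, List.nil_append, PySem.List.pyRange_one, List.map_map]
  rw [show ((fun i => pvSentence (PySem.List.pyGetD pvCategories (PySem.Int.mod i 5) "")) ∘ fun k : Nat => (0 : Int) + (k : Int)) =
      (fun i : Nat => (pvCategories.map pvSentence).getD (i % 5) "") from
    funext fun i => by simpa using pv_elem_eq i]
  rw [pv_range_mod_eq (pvCategories.map pvSentence) rfl]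
  have hq : (PySem.Int.floordiv (max n 0) 5).toNat = (n - 0).toNat / 5 := by
    rw [PySem.Int.floordiv_eq_ediv_of_pos (by norm_num)]
    omega
  have hr : (PySem.Int.mod (max n 0) 5).toNat = (n - 0).toNat % 5 := by
    rw [PySem.Int.mod_eq_emod_of_pos (by norm_num)]
    omega
  rw [hq, hr]

-- ===== VERDICT (by name: the statement is the Claim_ definition above) =====
theorem generate_news_articles_spec : Claim_equal_generate_news_articles := by
  intro n _
  exact (generate_news_articles_eq n)
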